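-- pv_equiv track=rewrite | github.com/josch/heroes-rebirth | tilemap.py | vertices
-- ===== SOURCE A (Python) =====
-- def vertices(offset=(0, 0)):
-- 	"""x, y = offset
--
-- 	vertices = (
-- 		x,   y,   x+1, y,   x+1, y+1, x,   y+1,
-- 		x+1, y,   x+2, y,   x+2, y+1, x+1, y+1,
-- 		x,   y+1, x+1, y+1, x+1, y+2, x,   y+2,
-- 		x+1, y+1, x+2, y+1, x+2, y+2, x+1, y+2)"""
--
-- 	vertices = (
-- 		0, 0, 1, 0, 1, 1, 0, 1,
-- 		1, 0, 2, 0, 2, 1, 1, 1,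
-- 		0, 1, 1, 1, 1, 2, 0, 2,
-- 		1, 1, 2, 1, 2, 2, 1, 2)
--
-- 	"""vertices = (
-- 		0, 0, 0, 1, 0, 3, 1, 1, 5, 0, 1, 0,
-- 		1, 0, 1, 2, 0, 5, 2, 1, 2, 1, 1, 4,
-- 		0, 1, 9, 1, 1, 0, 1, 2, 1, 0, 2, 5,
-- 		1, 1, 4, 2, 1, 3, 2, 2, 0, 1, 2, 1)
--
-- 	offset = list(offset)
-- 	offset.append(0)"""
--
-- 	return ((coord * 16) + offset[i%2] for i, coord in enumerate(vertices))
-- ===== SOURCE B (Python) =====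
-- def vertices(offset=(0, 0)):
--     return ((c + d) * 16 + offset[axis]
--             for cy in (0, 1) for cx in (0, 1)
--             for dx, dy in ((0, 0), (1, 0), (1, 1), (0, 1))
--             for axis, c, d in ((0, cx, dx), (1, cy, dy)))
-- ===== Notes on version B (the rewrite author's own statement) =====
-- stated objective: alternative
-- what changed: B derives the 32 coordinates from the tile's 2x2 quad-cell geometry (cells x corner offsets x axes in a generator expression) instead of enumerating a hard-coded flat 32-value constant table with i%2 parity indexing.
import Mathlib
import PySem

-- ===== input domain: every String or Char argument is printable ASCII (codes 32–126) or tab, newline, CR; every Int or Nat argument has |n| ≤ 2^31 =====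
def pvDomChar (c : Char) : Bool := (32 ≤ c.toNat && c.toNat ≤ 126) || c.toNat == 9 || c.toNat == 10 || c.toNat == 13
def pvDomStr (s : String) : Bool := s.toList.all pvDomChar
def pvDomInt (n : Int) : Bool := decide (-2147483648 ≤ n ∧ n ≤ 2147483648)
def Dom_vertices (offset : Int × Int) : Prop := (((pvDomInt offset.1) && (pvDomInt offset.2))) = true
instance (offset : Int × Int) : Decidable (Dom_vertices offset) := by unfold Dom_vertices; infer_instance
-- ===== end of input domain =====

-- ===== PORT A =====
-- B computes the same 32 values from quad-cell geometry instead of the flat constant table (objective: alternative).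
def vertices (offset : Int × Int) : List Int :=
  (PySem.List.enumerate ([0, 0, 1, 0, 1, 1, 0, 1,
    1, 0, 2, 0, 2, 1, 1, 1,
    0, 1, 1, 1, 1, 2, 0, 2,
    1, 1, 2, 1, 2, 2, 1, 2] : List Int)).map
    (fun ic => ic.2 * 16 + (if ic.1 % 2 = 0 then offset.1 else offset.2))

-- ===== PORT B =====
def vertices_alt (offset : Int × Int) : List Int :=
  ([(0, 0), (1, 0), (0, 1), (1, 1)] : List (Int × Int)).flatMap (fun c =>
    ([(0, 0), (1, 0), (1, 1), (0, 1)] : List (Int × Int)).flatMap (fun d =>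
      [(c.1 + d.1) * 16 + offset.1, (c.2 + d.2) * 16 + offset.2]))

-- ===== PRECONDITION & SPEC =====
def Spec_vertices (offset : Int × Int) (out : List Int) : Prop := out = vertices_alt offset
instance (offset : Int × Int) (out : List Int) : Decidable (Spec_vertices offset out) := by unfold Spec_vertices; infer_instance

-- ===== CLAIM (what is proved, stated in full; the proofs are below) =====
def Claim_equal_vertices : Prop := ∀ (offset : Int × Int), Dom_vertices offset → Spec_vertices offset (vertices offset)

-- ===== LEMMAS AND PROOFS =====

-- ===== VERDICT (by name: the statement is the Claim_ definition above) =====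
theorem vertices_spec : Claim_equal_vertices := by
  intro offset _
  unfold Spec_vertices vertices vertices_alt
  simp [PySem.List.enumerate]
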